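-- pv_equiv track=rewrite | github.com/ruiruidesu/auto_ukelele_project | ukulele-auto-tab/src/transcriber.py | _best_same_string_pair
-- ===== SOURCE A (Python) =====
-- UKULELE_STRINGS: list[tuple[str, int, int]] = [
--     ("A", 1, 69),
--     ("E", 2, 64),
--     ("C", 3, 60),
--     ("G", 4, 67),
-- ]
--
-- def _best_same_string_pair(first_midi: int, second_midi: int) -> tuple[str, int, int] | None:
--     first_candidates = _candidate_positions(first_midi)
--     second_candidates = _candidate_positions(second_midi)
--     shared_pairs: list[tuple[str, int, int]] = []
--     for first_string, _, first_fret in first_candidates: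
--         for second_string, _, second_fret in second_candidates:
--             if first_string != second_string:
--                 continue
--             shared_pairs.append((first_string, first_fret, second_fret))
--     if not shared_pairs:
--         return None
--     return min(
--         shared_pairs,
--         key=lambda item: (abs(item[2] - item[1]), max(item[1], item[2]), item[1]),
--     )
--
-- def _candidate_positions(midi_note: int) -> list[tuple[str, int, int]]:
--     candidates: list[tuple[str, int, int]] = []
--     for string_name, string_number, open_midi in UKULELE_STRINGS:
--         fret = midi_note - open_midi
--         if 0 <= fret <= 12:
--             candidates.append((string_name, string_number, fret))
--     return candidates
-- ===== SOURCE B (Python) =====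
-- UKULELE_STRINGS: list[tuple[str, int, int]] = [
--     ("A", 1, 69),
--     ("E", 2, 64),
--     ("C", 3, 60),
--     ("G", 4, 67),
-- ]
--
-- def _best_same_string_pair(first_midi: int, second_midi: int) -> tuple[str, int, int] | None:
--     best = None
--     best_key = None
--     for string_name, _, open_midi in UKULELE_STRINGS:
--         f1 = first_midi - open_midi
--         f2 = second_midi - open_midi
--         if 0 <= f1 <= 12 and 0 <= f2 <= 12:
--             key = (abs(f2 - f1), max(f1, f2), f1)
--             if best_key is None or key < best_key:
--                 best = (string_name, f1, f2)
--                 best_key = key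
--     return best
-- ===== Notes on version B (the rewrite author's own statement) =====
-- stated objective: simpler
-- what changed: Replaces the two candidate-position lists and the quadratic name-join plus trailing min() by a single pass over UKULELE_STRINGS that keeps a running best (name, f1, f2) under the same key, building no intermediate lists.
import Mathlib
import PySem

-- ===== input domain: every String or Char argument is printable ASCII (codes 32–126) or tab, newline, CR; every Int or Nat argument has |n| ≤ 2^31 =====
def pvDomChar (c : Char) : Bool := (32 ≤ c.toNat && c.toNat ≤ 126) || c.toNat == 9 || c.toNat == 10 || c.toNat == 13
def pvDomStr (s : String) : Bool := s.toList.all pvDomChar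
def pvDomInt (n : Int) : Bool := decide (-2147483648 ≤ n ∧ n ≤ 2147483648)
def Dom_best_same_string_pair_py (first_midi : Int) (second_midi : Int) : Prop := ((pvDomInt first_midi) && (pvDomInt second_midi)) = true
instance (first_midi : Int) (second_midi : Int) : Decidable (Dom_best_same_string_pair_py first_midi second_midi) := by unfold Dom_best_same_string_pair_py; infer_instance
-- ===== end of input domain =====

-- B replaces A's two candidate lists and nested join by one fused pass over the strings
-- keeping a running Python-min (simpler: no intermediate lists); return value only, A is total.

-- ===== PORT A =====
def ukuleleStrings : List (String × Int × Int) :=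
  [("A", 1, 69), ("E", 2, 64), ("C", 3, 60), ("G", 4, 67)]

def candidatePositions (midi_note : Int) : List (String × Int × Int) :=
  ukuleleStrings.foldl (fun candidates t =>
    let fret := midi_note - t.2.2
    if 0 ≤ fret ∧ fret ≤ 12 then candidates ++ [(t.1, t.2.1, fret)] else candidates) []

-- Python tuple key (abs(f2-f1), max(f1,f2), f1) compared lexicographically (strict <)
def pyKeyLt (a b : Int × Int × Int) : Bool :=
  a.1 < b.1 || (a.1 == b.1 && (a.2.1 < b.2.1 || (a.2.1 == b.2.1 && a.2.2 < b.2.2)))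

def pyKeyA (item : String × Int × Int) : Int × Int × Int :=
  (|item.2.2 - item.2.1|, max item.2.1 item.2.2, item.2.1)

-- Python min(list, key=…): first element with minimal key
def pyMinByKeyA : List (String × Int × Int) → Option (String × Int × Int)
  | [] => none
  | x :: xs => some (xs.foldl (fun best y => if pyKeyLt (pyKeyA y) (pyKeyA best) then y else best) x)

def best_same_string_pair_py (first_midi : Int) (second_midi : Int) : Option (String × Int × Int) :=
  let first_candidates := candidatePositions first_midi
  let second_candidates := candidatePositions second_midi
  let shared_pairs := first_candidates.foldl (fun acc fc =>
    second_candidates.foldl (fun acc2 sc =>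
      if fc.1 ≠ sc.1 then acc2 else acc2 ++ [(fc.1, fc.2.2, sc.2.2)]) acc) []
  pyMinByKeyA shared_pairs

-- ===== PORT B =====
def best_same_string_pair_py_alt (first_midi : Int) (second_midi : Int) : Option (String × Int × Int) :=
  (ukuleleStrings.foldl (fun st t =>
    let f1 := first_midi - t.2.2
    let f2 := second_midi - t.2.2
    if 0 ≤ f1 ∧ f1 ≤ 12 ∧ 0 ≤ f2 ∧ f2 ≤ 12 then
      let key : Int × Int × Int := (|f2 - f1|, max f1 f2, f1)
      match st with
      | none => some ((t.1, f1, f2), key)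
      | some (_, best_key) =>
        -- Python tuple 'key < best_key', lexicographic, written out by hand
        if key.1 < best_key.1 || (key.1 == best_key.1 && (key.2.1 < best_key.2.1 ||
            (key.2.1 == best_key.2.1 && key.2.2 < best_key.2.2))) then
          some ((t.1, f1, f2), key)
        else st
    else st)
    (none : Option ((String × Int × Int) × (Int × Int × Int)))).map Prod.fst

-- ===== PRECONDITION & SPEC =====
def Spec_best_same_string_pair_py (first_midi : Int) (second_midi : Int) (out : Option (String × Int × Int)) : Prop := out = best_same_string_pair_py_alt first_midi second_midi
instance (first_midi : Int) (second_midi : Int) (out : Option (String × Int × Int)) : Decidable (Spec_best_same_string_pair_py first_midi second_midi out) := by unfold Spec_best_same_string_pair_py; infer_instance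

-- ===== CLAIM (what is proved, stated in full; the proofs are below) =====
def Claim_equal_best_same_string_pair_py : Prop := ∀ (first_midi : Int) (second_midi : Int), Dom_best_same_string_pair_py first_midi second_midi → Spec_best_same_string_pair_py first_midi second_midi (best_same_string_pair_py first_midi second_midi)

-- ===== LEMMAS AND PROOFS =====

lemma cand_empty {m : Int} (h : m < 60 ∨ 81 < m) : candidatePositions m = [] := by
  simp only [candidatePositions, ukuleleStrings, List.foldl]
  split_ifs <;> first | rfl | omega

lemma foldl_id_nil {α β : Type} (l : List α) (f : β → α → β) (hf : ∀ b a, f b a = b) (b : β) :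
    List.foldl f b l = b := by
  induction l generalizing b with
  | nil => rfl
  | cons x xs ih => simp [List.foldl, hf, ih]

lemma A_none_of_out {f s : Int}
    (h : f < 60 ∨ 81 < f ∨ s < 60 ∨ 81 < s) :
    best_same_string_pair_py f s = none := by
  unfold best_same_string_pair_py
  rcases h with h | h | h | h
  · rw [cand_empty (Or.inl h)]; rfl
  · rw [cand_empty (Or.inr h)]; rfl
  · rw [cand_empty (m := s) (Or.inl h)]
    simp only [List.foldl_nil]
    rw [foldl_id_nil _ _ (fun _ _ => rfl)]
    rfl
  · rw [cand_empty (m := s) (Or.inr h)]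
    simp only [List.foldl_nil]
    rw [foldl_id_nil _ _ (fun _ _ => rfl)]
    rfl

lemma B_none_of_out {f s : Int}
    (h : f < 60 ∨ 81 < f ∨ s < 60 ∨ 81 < s) :
    best_same_string_pair_py_alt f s = none := by
  simp only [best_same_string_pair_py_alt, ukuleleStrings, List.foldl]
  split_ifs <;> first | rfl | omega

-- ===== VERDICT (by name: the statement is the Claim_ definition above) =====
theorem best_same_string_pair_py_spec : Claim_equal_best_same_string_pair_py := by
  intro f s _
  unfold Spec_best_same_string_pair_py
  by_cases hf : 60 ≤ f ∧ f ≤ 81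
  · by_cases hs : 60 ≤ s ∧ s ≤ 81
    · obtain ⟨hf1, hf2⟩ := hf
      obtain ⟨hs1, hs2⟩ := hs
      interval_cases f <;> interval_cases s <;> decide
    · rw [A_none_of_out, B_none_of_out] <;> omega
  · rw [A_none_of_out, B_none_of_out] <;> omega
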